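-- pv_equiv track=rewrite | github.com/xXKhanShahebXx/rubric_gen | rubric_gen/compiled/discovered_augmentation.py | compute_note_family_scope_for_proposal
-- ===== SOURCE A (Python) =====
-- from typing import Any, Dict, List, Mapping, Optional, Tuple
--
-- def compute_note_family_scope_for_proposal(
--     example_ids: List[str],
--     example_id_to_nf: Mapping[str, str],
-- ) -> Optional[List[str]]:
--     """
--     If all supporting examples share one note family, scope templates to it.
--     If mixed or unknown, return None (instantiate for any note family).
--     """
--     nfs: List[str] = []
--     for eid in example_ids:
--         nf = example_id_to_nf.get(eid)
--         if nf:
--             nfs.append(nf)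
--     if not nfs:
--         return None
--     uniq = sorted(set(nfs))
--     if len(uniq) == 1:
--         return uniq
--     return None
-- ===== SOURCE B (Python) =====
-- from typing import List, Mapping, Optional
--
-- def compute_note_family_scope_for_proposal(
--     example_ids: List[str],
--     example_id_to_nf: Mapping[str, str],
-- ) -> Optional[List[str]]:
--     candidate = None
--     for eid in example_ids:
--         nf = example_id_to_nf.get(eid)
--         if nf:
--             if candidate is None:
--                 candidate = nf
--             elif nf != candidate:
--                 return None
--     return None if candidate is None else [candidate]
-- ===== Notes on version B (the rewrite author's own statement) =====
-- stated objective: simpler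
-- what changed: Single pass keeping one candidate string and short-circuiting on a second distinct family, instead of collecting a list, building a set and sorting it.
import Mathlib
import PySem

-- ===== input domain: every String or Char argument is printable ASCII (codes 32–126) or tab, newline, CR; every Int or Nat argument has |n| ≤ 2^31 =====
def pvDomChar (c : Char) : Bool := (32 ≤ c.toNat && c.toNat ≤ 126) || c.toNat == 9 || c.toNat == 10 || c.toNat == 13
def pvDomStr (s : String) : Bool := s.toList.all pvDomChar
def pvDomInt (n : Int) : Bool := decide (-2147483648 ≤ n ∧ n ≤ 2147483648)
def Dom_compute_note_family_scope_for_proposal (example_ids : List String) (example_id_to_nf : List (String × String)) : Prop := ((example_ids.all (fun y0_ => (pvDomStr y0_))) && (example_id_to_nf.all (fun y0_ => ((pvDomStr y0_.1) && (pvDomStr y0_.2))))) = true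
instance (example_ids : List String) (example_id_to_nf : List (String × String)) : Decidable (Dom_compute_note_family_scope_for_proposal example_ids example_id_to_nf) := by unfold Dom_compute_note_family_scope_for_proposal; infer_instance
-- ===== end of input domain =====

-- B is a simpler single pass keeping one candidate family and short-circuiting on a second
-- distinct one, instead of A's collect-filter list, set build and sort.

-- ===== PORT A =====
-- A: collect truthy lookups into nfs, then sorted(set(nfs)), return it iff it is a singleton.
def compute_note_family_scope_for_proposal (example_ids : List String) (example_id_to_nf : List (String × String)) : Option (List String) :=
  let nfs : List String := example_ids.foldl (fun acc eid =>
    match example_id_to_nf.lookup eid with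
    | some nf => if nf ≠ "" then acc ++ [nf] else acc
    | none => acc) []
  if nfs = [] then none
  else
    let uniq := PySem.List.sorted (PySem.Set.ofList nfs) (fun x => x) false
    if uniq.length = 1 then some uniq else none

-- ===== PORT B =====
-- B: one pass with a candidate sentinel; return none at the first conflicting family.
def pvAltLoop (example_id_to_nf : List (String × String)) : List String → Option String → Option (List String)
  | [], cand =>
    match cand with
    | some c => some [c]
    | none => none
  | eid :: rest, cand =>
    match example_id_to_nf.lookup eid with
    | some nf =>
      if nf ≠ "" then
        match cand with
        | none => pvAltLoop example_id_to_nf rest (some nf)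
        | some c => if nf ≠ c then none else pvAltLoop example_id_to_nf rest cand
      else pvAltLoop example_id_to_nf rest cand
    | none => pvAltLoop example_id_to_nf rest cand

def compute_note_family_scope_for_proposal_alt (example_ids : List String) (example_id_to_nf : List (String × String)) : Option (List String) :=
  pvAltLoop example_id_to_nf example_ids none

-- ===== PRECONDITION & SPEC =====
def Spec_compute_note_family_scope_for_proposal (example_ids : List String) (example_id_to_nf : List (String × String)) (out : Option (List String)) : Prop := out = compute_note_family_scope_for_proposal_alt example_ids example_id_to_nf
instance (example_ids : List String) (example_id_to_nf : List (String × String)) (out : Option (List String)) : Decidable (Spec_compute_note_family_scope_for_proposal example_ids example_id_to_nf out) := by unfold Spec_compute_note_family_scope_for_proposal; infer_instance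

-- ===== CLAIM (what is proved, stated in full; the proofs are below) =====
def Claim_equal_compute_note_family_scope_for_proposal : Prop := ∀ (example_ids : List String) (example_id_to_nf : List (String × String)), Dom_compute_note_family_scope_for_proposal example_ids example_id_to_nf → Spec_compute_note_family_scope_for_proposal example_ids example_id_to_nf (compute_note_family_scope_for_proposal example_ids example_id_to_nf)

-- ===== LEMMAS AND PROOFS =====

-- the truthy note families of the ids, in order
def pvNfs (example_id_to_nf : List (String × String)) : List String → List String
  | [] => []
  | eid :: rest =>
    match example_id_to_nf.lookup eid with
    | some nf => if nf ≠ "" then nf :: pvNfs example_id_to_nf rest else pvNfs example_id_to_nf rest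
    | none => pvNfs example_id_to_nf rest

-- the common reference: singleton of the shared family, else none
def pvRef : List String → Option (List String)
  | [] => none
  | x :: t => if t.all (fun y => y == x) then some [x] else none

theorem pvFoldl_nfs (m : List (String × String)) :
    ∀ (ids : List String) (acc : List String),
      ids.foldl (fun acc eid =>
        match m.lookup eid with
        | some nf => if nf ≠ "" then acc ++ [nf] else acc
        | none => acc) acc = acc ++ pvNfs m ids := by
  intro ids
  induction ids with
  | nil => intro acc; simp [pvNfs]
  | cons eid rest ih =>
    intro acc
    rw [List.foldl_cons, ih]
    cases h : m.lookup eid with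
    | none => simp [pvNfs, h]
    | some nf =>
      by_cases hnf : nf = "" <;> simp [pvNfs, h, hnf]

theorem pvAltLoop_some (m : List (String × String)) :
    ∀ (ids : List String) (c : String),
      pvAltLoop m ids (some c) =
        if (pvNfs m ids).all (fun y => y == c) then some [c] else none := by
  intro ids
  induction ids with
  | nil => intro c; simp [pvAltLoop, pvNfs]
  | cons eid rest ih =>
    intro c
    cases h : m.lookup eid with
    | none => simp [pvAltLoop, pvNfs, h, ih]
    | some nf =>
      by_cases hnf : nf = ""
      · simp [pvAltLoop, pvNfs, h, hnf, ih]
      · by_cases hc : nf = c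
        · subst hc; simp [pvAltLoop, pvNfs, h, hnf, ih]
        · simp [pvAltLoop, pvNfs, h, hnf, hc]

theorem pvAlt_eq_ref (m : List (String × String)) (ids : List String) :
    compute_note_family_scope_for_proposal_alt ids m = pvRef (pvNfs m ids) := by
  unfold compute_note_family_scope_for_proposal_alt
  induction ids with
  | nil => simp [pvAltLoop, pvNfs, pvRef]
  | cons eid rest ih =>
    cases h : m.lookup eid with
    | none => simpa [pvAltLoop, pvNfs, h] using ih
    | some nf =>
      by_cases hnf : nf = ""
      · simpa [pvAltLoop, pvNfs, h, hnf] using ih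
      · simp [pvAltLoop, pvNfs, h, hnf, pvAltLoop_some, pvRef]

theorem pvOfList_all_eq (x : String) :
    ∀ (l : List String), (∀ y ∈ l, y = x) → List.foldl PySem.Set.add [x] l = [x] := by
  intro l
  induction l with
  | nil => intro _; rfl
  | cons a t ih =>
    intro h
    have ha : a = x := h a (by simp)
    have : PySem.Set.add [x] a = [x] := by
      simp [PySem.Set.add, ha, PySem.Set.contains]
    simp only [List.foldl_cons, this]
    exact ih (fun y hy => h y (by simp [hy]))

theorem pvA_eq_ref (m : List (String × String)) (ids : List String) :
    compute_note_family_scope_for_proposal ids m = pvRef (pvNfs m ids) := by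
  unfold compute_note_family_scope_for_proposal
  rw [pvFoldl_nfs]
  simp only [List.nil_append]
  cases hl : pvNfs m ids with
  | nil => simp [pvRef]
  | cons x t =>
    simp only [pvRef]
    by_cases hall : ∀ y ∈ t, y = x
    · have hset : PySem.Set.ofList (x :: t) = [x] := by
        have : PySem.Set.ofList (x :: t) = List.foldl PySem.Set.add [x] t := by
          simp [PySem.Set.ofList_eq_foldl, PySem.Set.add, PySem.Set.contains]
        rw [this, pvOfList_all_eq x t hall]
      have hallb : t.all (fun y => y == x) = true := by
        simp only [List.all_eq_true]
        intro y hy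
        simp [hall y hy]
      rw [hset]
      simp [hallb, PySem.List.sorted, PySem.List.insertBy]
    · push Not at hall
      obtain ⟨a, ha, hax⟩ := hall
      have hallb : (t.all (fun y => y == x)) = false := by
        simp only [List.all_eq_false]
        exact ⟨a, ha, by simp [hax]⟩
      rw [hallb]
      simp only [if_neg (by simp : ¬ (x :: t = []))] at *
      have hx : x ∈ PySem.List.sorted (PySem.Set.ofList (x :: t)) (fun y => y) false := by
        rw [PySem.List.mem_sorted, PySem.Set.mem_ofList]; simp
      have hav : a ∈ PySem.List.sorted (PySem.Set.ofList (x :: t)) (fun y => y) false := by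
        rw [PySem.List.mem_sorted, PySem.Set.mem_ofList]; simp [ha]
      have hlen : (PySem.List.sorted (PySem.Set.ofList (x :: t)) (fun y => y) false).length ≠ 1 := by
        intro h1
        obtain ⟨u, hu⟩ := List.length_eq_one_iff.mp h1
        rw [hu] at hx hav
        simp only [List.mem_singleton] at hx hav
        exact hax (hav.trans hx.symm)
      rw [PySem.List.length_sorted] at hlen
      simp [hlen, Bool.false_eq_true]

-- ===== VERDICT (by name: the statement is the Claim_ definition above) =====
theorem compute_note_family_scope_for_proposal_spec : Claim_equal_compute_note_family_scope_for_proposal := by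
  intro ids m _
  unfold Spec_compute_note_family_scope_for_proposal
  rw [pvA_eq_ref, pvAlt_eq_ref]
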